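-- pv_equiv track=rewrite | github.com/bibinjose/hackerrank | week challenge/revisedRussianRoulette.py | revisedRussianRoulette
-- ===== SOURCE A (Python) =====
-- def revisedRussianRoulette(doors):
--     min=0
--     counter=0
--     max=(doors.count(1))
--     for door in doors:
--         if door==1:
--             counter+=1
--             if counter==2:
--                 counter=0
--                 min+=1
--         else:
--             counter=0
--
--     return max-min,max
-- ===== SOURCE B (Python) =====
-- from itertools import groupby
--
-- def revisedRussianRoulette(doors):
--     mx = sum(1 for d in doors if d == 1)
--     mn = sum(len(list(g)) // 2 for k, g in groupby(doors, key=lambda x: x == 1) if k)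
--     return mx - mn, mx
-- ===== Notes on version B (the rewrite author's own statement) =====
-- stated objective: alternative
-- what changed: Replaces the per-element counter state machine with a group-then-aggregate pass: groupby splits the list into maximal runs keyed on (x==1) and the saved doors are the sum of len(run)//2 over runs of ones.
import Mathlib
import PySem

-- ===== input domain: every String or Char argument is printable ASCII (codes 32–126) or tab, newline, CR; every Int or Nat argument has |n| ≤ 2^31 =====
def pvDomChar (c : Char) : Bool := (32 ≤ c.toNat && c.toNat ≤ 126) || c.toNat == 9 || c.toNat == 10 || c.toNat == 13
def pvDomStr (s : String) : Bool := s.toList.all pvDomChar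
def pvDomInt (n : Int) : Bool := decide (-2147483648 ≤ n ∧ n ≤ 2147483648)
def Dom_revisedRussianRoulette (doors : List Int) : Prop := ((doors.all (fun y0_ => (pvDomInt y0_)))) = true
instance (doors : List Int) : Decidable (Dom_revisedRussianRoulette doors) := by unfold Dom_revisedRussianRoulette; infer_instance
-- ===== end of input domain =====

-- B replaces A's per-element counter state machine by a group-then-aggregate pass over maximal runs (objective: alternative).

-- ===== PORT A =====
-- A's for-loop over state (min, counter), step for step.
def pvLoopA : List Int → Int → Int → Int
  | [], mn, _ => mn
  | d :: t, mn, counter =>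
    if d == 1 then
      if counter + 1 == 2 then pvLoopA t (mn + 1) 0
      else pvLoopA t mn (counter + 1)
    else pvLoopA t mn 0

def revisedRussianRoulette (doors : List Int) : Int × Int :=
  let mx : Int := PySem.List.count doors 1
  let mn : Int := pvLoopA doors 0 0
  (mx - mn, mx)

-- ===== PORT B =====
-- itertools.groupby(doors, key = fun x => x == 1): maximal runs as (key, run length).
def pvGrp : Bool → Nat → List Int → List (Bool × Nat)
  | k, n, [] => [(k, n)]
  | k, n, x :: xs => if (x == 1) == k then pvGrp k (n + 1) xs else (k, n) :: pvGrp (x == 1) 1 xs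

def pvRuns : List Int → List (Bool × Nat)
  | [] => []
  | x :: xs => pvGrp (x == 1) 1 xs

def revisedRussianRoulette_alt (doors : List Int) : Int × Int :=
  let mx : Int := doors.foldl (fun acc d => if d == 1 then acc + 1 else acc) 0
  let mn : Int := (pvRuns doors).foldl (fun acc g => if g.1 then acc + ((g.2 / 2 : Nat) : Int) else acc) 0
  (mx - mn, mx)

-- ===== PRECONDITION & SPEC =====
def Spec_revisedRussianRoulette (doors : List Int) (out : Int × Int) : Prop := out = revisedRussianRoulette_alt doors
instance (doors : List Int) (out : Int × Int) : Decidable (Spec_revisedRussianRoulette doors out) := by unfold Spec_revisedRussianRoulette; infer_instance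

-- ===== CLAIM (what is proved, stated in full; the proofs are below) =====
def Claim_equal_revisedRussianRoulette : Prop := ∀ (doors : List Int), Dom_revisedRussianRoulette doors → Spec_revisedRussianRoulette doors (revisedRussianRoulette doors)

-- ===== LEMMAS AND PROOFS =====

-- sum of the run contributions, as a plain recursion (for reasoning about B's fold)
def pvSumC : List (Bool × Nat) → Int
  | [] => 0
  | g :: t => (if g.1 then ((g.2 / 2 : Nat) : Int) else 0) + pvSumC t

lemma pvFoldl_eq_sumC (l : List (Bool × Nat)) (a : Int) :
    l.foldl (fun acc g => if g.1 then acc + ((g.2 / 2 : Nat) : Int) else acc) a = a + pvSumC l := by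
  induction l generalizing a with
  | nil => simp [pvSumC]
  | cons g t ih =>
    simp only [List.foldl, pvSumC]
    by_cases h : g.1
    · simp only [h, if_true]
      rw [ih]
      ring
    · rw [if_neg h, if_neg h, ih]
      ring

lemma pvLoopA_shift (xs : List Int) (m c : Int) :
    pvLoopA xs m c = m + pvLoopA xs 0 c := by
  induction xs generalizing m c with
  | nil => simp [pvLoopA]
  | cons d t ih =>
    simp only [pvLoopA]
    by_cases h : d == 1 <;> by_cases h2 : c + 1 == 2 <;>
      simp [h, h2, ih (m + 1), ih m, ih 1] <;> ring

-- the run-sum on the remaining input, given the current run (k, n), equals what A's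
-- counter loop still produces (counter = n % 2 inside a run of ones)
lemma pvGrp_sum (xs : List Int) (k : Bool) (n : Nat) :
    pvSumC (pvGrp k n xs) =
      (if k then ((n / 2 : Nat) : Int) else 0) +
        pvLoopA xs 0 (if k then ((n % 2 : Nat) : Int) else 0) := by
  induction xs generalizing k n with
  | nil => cases k <;> simp [pvGrp, pvSumC, pvLoopA]
  | cons x t ih =>
    simp only [pvGrp]
    by_cases hx : x == 1
    · cases k with
      | true =>
        rw [if_pos (by simp [hx]), ih true (n + 1)]
        simp only [if_true]
        rcases Nat.mod_two_eq_zero_or_one n with h | h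
        · have h1 : (n + 1) % 2 = 1 := by omega
          have h2 : (n + 1) / 2 = n / 2 := by omega
          rw [h, h1, h2]
          simp [pvLoopA, hx]
        · have h1 : (n + 1) % 2 = 0 := by omega
          have h2 : (n + 1) / 2 = n / 2 + 1 := by omega
          rw [h, h1, h2]
          simp [pvLoopA, hx, pvLoopA_shift t 1 0]
          ring
      | false =>
        rw [if_neg (by simp [hx])]
        simp only [pvSumC, hx, ih true 1]
        simp [pvLoopA, hx]
    · rw [Bool.not_eq_true] at hx
      cases k with
      | true =>
        rw [if_neg (by simp [hx])]
        simp only [pvSumC, hx, ih false 1]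
        simp [pvLoopA, hx]
      | false =>
        rw [if_pos (by simp [hx]), ih false (n + 1)]
        simp [pvLoopA, hx]

lemma pvRuns_sum (doors : List Int) : pvSumC (pvRuns doors) = pvLoopA doors 0 0 := by
  cases doors with
  | nil => simp [pvRuns, pvSumC, pvLoopA]
  | cons x xs =>
    simp only [pvRuns, pvGrp_sum xs (x == 1) 1]
    by_cases hx : x == 1 <;> simp [hx, pvLoopA]

-- ===== VERDICT (by name: the statement is the Claim_ definition above) =====
theorem revisedRussianRoulette_spec : Claim_equal_revisedRussianRoulette := by
  intro doors _
  show _ = _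
  simp only [revisedRussianRoulette, revisedRussianRoulette_alt,
    PySem.List.foldl_beq_add_one, PySem.List.count_eq, pvFoldl_eq_sumC, pvRuns_sum, zero_add]
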